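-- pv_equiv track=rewrite | github.com/ppski/cmdlng | backend/words/lookup.py | clean_lookup_pos
-- ===== SOURCE A (Python) =====
-- from typing import Union
--
-- def clean_lookup_pos(lookup_pos: str) -> Union[str, None]:
--     if not lookup_pos:
--         return None
--     pos_dict = {
--         "NOUN": ["noun", "n", "nm"],
--         "VERB": ["verb", "v", "vtr", "vi", "vimp", "vimpers", "vrefl", "vimpv"],
--         "VPHRASE": ["v expr", "v expression"],
--         "ADJ": ["adjective"],
--         "ADV": ["adverb"],
--         "PRON": ["pronoun"],
--         "PROPN": ["proper noun"],
--         "PREP": ["preposition"],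
--         "CONJ": ["conjunction"],
--         "INTJ": ["interjection", "interj", "inter"],
--         "DET": ["determiner"],
--         "NUM": ["numeral", "number"],
--         "PHRASE": ["phrase"],
--         "X": ["other", "unknown"],
--     }
--
--     if lookup_pos.upper() in list(pos_dict.keys()):
--         return lookup_pos.upper()
--
--     for pos in pos_dict:
--         if lookup_pos in pos_dict[pos]:
--             return pos
--     # If no match
--     return "X"
-- ===== SOURCE B (Python) =====
-- from typing import Union
--
-- _POS = {
--     "NOUN": ["noun", "n", "nm"],
--     "VERB": ["verb", "v", "vtr", "vi", "vimp", "vimpers", "vrefl", "vimpv"],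
--     "VPHRASE": ["v expr", "v expression"],
--     "ADJ": ["adjective"],
--     "ADV": ["adverb"],
--     "PRON": ["pronoun"],
--     "PROPN": ["proper noun"],
--     "PREP": ["preposition"],
--     "CONJ": ["conjunction"],
--     "INTJ": ["interjection", "interj", "inter"],
--     "DET": ["determiner"],
--     "NUM": ["numeral", "number"],
--     "PHRASE": ["phrase"],
--     "X": ["other", "unknown"],
-- }
-- _TAGS = set(_POS)
-- # inverted index: alias -> canonical tag (aliases are pairwise distinct)
-- _ALIAS_TO_TAG = {alias: tag for tag, aliases in _POS.items() for alias in aliases}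
--
-- def clean_lookup_pos(lookup_pos: str) -> Union[str, None]:
--     if not lookup_pos:
--         return None
--     tag = lookup_pos.upper()
--     if tag in _TAGS:
--         return tag
--     return _ALIAS_TO_TAG.get(lookup_pos, "X")
-- ===== Notes on version B (the rewrite author's own statement) =====
-- stated objective: idiomatic
-- what changed: The per-tag scanning loop over the dict's alias lists is replaced by a single inverted alias->tag dictionary built once at module level, so a call does two O(1) lookups instead of scanning every alias list.
import Mathlib
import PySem

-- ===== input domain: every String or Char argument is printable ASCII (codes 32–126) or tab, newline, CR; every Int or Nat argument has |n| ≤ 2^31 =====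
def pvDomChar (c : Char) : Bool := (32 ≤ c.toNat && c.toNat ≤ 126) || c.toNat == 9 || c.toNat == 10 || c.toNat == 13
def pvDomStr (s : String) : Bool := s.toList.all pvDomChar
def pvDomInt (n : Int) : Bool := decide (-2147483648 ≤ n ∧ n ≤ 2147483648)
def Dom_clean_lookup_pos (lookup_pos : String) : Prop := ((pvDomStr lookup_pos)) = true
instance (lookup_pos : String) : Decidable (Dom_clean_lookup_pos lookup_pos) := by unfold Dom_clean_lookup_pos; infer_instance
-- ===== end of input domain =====

-- B replaces A's scan over every alias list by one inverted alias->tag dictionary built once (idiomatic).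

-- ===== PORT A =====
-- pos_dict, as the insertion-ordered association list (tag, aliases)
def posPairs : List (String × List String) :=
  [("NOUN", ["noun", "n", "nm"]),
   ("VERB", ["verb", "v", "vtr", "vi", "vimp", "vimpers", "vrefl", "vimpv"]),
   ("VPHRASE", ["v expr", "v expression"]),
   ("ADJ", ["adjective"]),
   ("ADV", ["adverb"]),
   ("PRON", ["pronoun"]),
   ("PROPN", ["proper noun"]),
   ("PREP", ["preposition"]),
   ("CONJ", ["conjunction"]),
   ("INTJ", ["interjection", "interj", "inter"]),
   ("DET", ["determiner"]),
   ("NUM", ["numeral", "number"]),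
   ("PHRASE", ["phrase"]),
   ("X", ["other", "unknown"])]

-- 'for pos in pos_dict: if lookup_pos in pos_dict[pos]: return pos' / 'return "X"'
def scanLoop (ps : List (String × List String)) (s : String) : String :=
  match ps with
  | [] => "X"
  | (tag, aliases) :: rest => if aliases.contains s then tag else scanLoop rest s

def clean_lookup_pos (lookup_pos : String) : Option String :=
  if lookup_pos = "" then none
  else
    let up := PySem.Str.upper lookup_pos
    if (posPairs.map (·.1)).contains up then some up
    else some (scanLoop posPairs lookup_pos)

-- ===== PORT B =====
-- Source B repeats the same dict literal _POS; its port reuses the identical constant posPairs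

-- _TAGS = set(_POS)
def tagsB : PySem.Set String := PySem.Set.ofList (posPairs.map (·.1))

-- _ALIAS_TO_TAG = {alias: tag for tag, aliases in _POS.items() for alias in aliases}
-- (association list; alias keys are pairwise distinct, so first-match lookup is the dict)
def aliasToTag : List (String × String) :=
  posPairs.flatMap (fun p => p.2.map (fun a => (a, p.1)))

def clean_lookup_pos_alt (lookup_pos : String) : Option String :=
  if lookup_pos = "" then none
  else
    let tag := PySem.Str.upper lookup_pos
    if PySem.Set.contains tagsB tag then some tag
    else some ((aliasToTag.lookup lookup_pos).getD "X")

-- ===== PRECONDITION & SPEC =====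
def Spec_clean_lookup_pos (lookup_pos : String) (out : Option String) : Prop := out = clean_lookup_pos_alt lookup_pos
instance (lookup_pos : String) (out : Option String) : Decidable (Spec_clean_lookup_pos lookup_pos out) := by unfold Spec_clean_lookup_pos; infer_instance

-- ===== CLAIM (what is proved, stated in full; the proofs are below) =====
def Claim_equal_clean_lookup_pos : Prop := ∀ (lookup_pos : String), Dom_clean_lookup_pos lookup_pos → Spec_clean_lookup_pos lookup_pos (clean_lookup_pos lookup_pos)

-- ===== LEMMAS AND PROOFS =====

-- looking up s among (a, tag) pairs made from one alias list: hit iff s is an alias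
lemma lookup_map_const {tag : String} (s : String) (aliases : List String) :
    ((aliases.map (fun a => (a, tag))).lookup s) = if aliases.contains s then some tag else none := by
  induction aliases with
  | nil => simp
  | cons a rest ih =>
      simp only [List.map_cons, List.lookup, List.contains_cons]
      by_cases h : s = a
      · simp [h]
      · have h' : (s == a) = false := by simp [h]
        have h'' : (a == s) = false := by simp [Ne.symm h]
        simp [h', ih]

-- A's scanning loop computes the inverted-index lookup (default "X")
lemma scanLoop_eq_lookup (ps : List (String × List String)) (s : String) :
    scanLoop ps s = ((ps.flatMap (fun p => p.2.map (fun a => (a, p.1)))).lookup s).getD "X" := by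
  induction ps with
  | nil => simp [scanLoop]
  | cons p rest ih =>
      obtain ⟨tag, aliases⟩ := p
      simp only [scanLoop, List.flatMap_cons, List.lookup_append, lookup_map_const]
      by_cases h : s ∈ aliases
      · simp [h]
      · simp [h, ih]

-- ===== VERDICT (by name: the statement is the Claim_ definition above) =====
theorem clean_lookup_pos_spec : Claim_equal_clean_lookup_pos := by
  intro s _
  unfold Spec_clean_lookup_pos clean_lookup_pos clean_lookup_pos_alt
  by_cases h0 : s = ""
  · simp [h0]
  · have hA : scanLoop posPairs s = (aliasToTag.lookup s).getD "X" := by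
      rw [scanLoop_eq_lookup]; rfl
    have hkeys : PySem.Set.contains tagsB (PySem.Str.upper s)
        = (posPairs.map (·.1)).contains (PySem.Str.upper s) := rfl
    simp only [if_neg h0, hkeys, hA]
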